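-- pv_equiv track=rewrite | github.com/ccompton6021/CSProblemSolvingandSolutionClass-FinalProject_rev2 | cleaning_modeling.py | find_target_frequencies
-- ===== SOURCE A (Python) =====
-- def find_target_frequencies(freqs):
--     for x in freqs:
--         if x > 500:
--             low_freq = x
--             break
--     for x in freqs:
--         if x > 1000:
--             mid_freq = x
--             break
--     for x in freqs:
--         if x > 1500:
--             high_freq = x
--             break
--     return low_freq, mid_freq, high_freq
-- ===== SOURCE B (Python) =====
-- def find_target_frequencies(freqs):
--     low_found = mid_found = high_found = False
--     for x in freqs:
--         if not low_found and x > 500: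
--             low_freq = x
--             low_found = True
--         if not mid_found and x > 1000:
--             mid_freq = x
--             mid_found = True
--         if not high_found and x > 1500:
--             high_freq = x
--             high_found = True
--         if low_found and mid_found and high_found:
--             break
--     return low_freq, mid_freq, high_freq
-- ===== Notes on version B (the rewrite author's own statement) =====
-- stated objective: alternative
-- what changed: Replaces A's three separate scans of freqs with a single loop that tracks all three targets at once with found-flags and breaks early once all are assigned.
import Mathlib
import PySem

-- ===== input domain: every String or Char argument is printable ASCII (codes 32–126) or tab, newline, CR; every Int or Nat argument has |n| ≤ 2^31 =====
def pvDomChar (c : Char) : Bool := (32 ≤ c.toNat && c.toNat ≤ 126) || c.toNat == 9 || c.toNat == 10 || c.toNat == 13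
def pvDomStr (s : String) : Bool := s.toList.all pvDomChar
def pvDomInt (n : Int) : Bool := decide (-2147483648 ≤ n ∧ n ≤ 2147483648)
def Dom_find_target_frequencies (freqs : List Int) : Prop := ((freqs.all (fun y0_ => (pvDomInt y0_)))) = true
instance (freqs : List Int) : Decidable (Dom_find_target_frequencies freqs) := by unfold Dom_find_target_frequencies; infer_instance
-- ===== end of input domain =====

-- B merges A's three scans into one early-exiting pass with found-flags (objective: alternative single-pass decomposition).
-- Where some threshold is unmet both Pythons raise UnboundLocalError; Pre_ excludes those inputs.

-- ===== PORT A =====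
-- 'for x in freqs: if x > t: v = x; break' — first element exceeding t, none = variable left unbound
def pvFirstGt (t : Int) : List Int → Option Int
  | [] => none
  | x :: xs => if x > t then some x else pvFirstGt t xs

def find_target_frequencies (freqs : List Int) : Int × Int × Int :=
  ((pvFirstGt 500 freqs).getD 0, (pvFirstGt 1000 freqs).getD 0, (pvFirstGt 1500 freqs).getD 0)

-- ===== PORT B =====
-- single pass; the three Options play the role of (found-flag, local); early return when all set
def pvLoopB : List Int → Option Int → Option Int → Option Int → Option Int × Option Int × Option Int
  | [], l, m, h => (l, m, h)
  | x :: xs, l, m, h =>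
    let l := if l.isNone && decide (x > 500) then some x else l
    let m := if m.isNone && decide (x > 1000) then some x else m
    let h := if h.isNone && decide (x > 1500) then some x else h
    if l.isSome && m.isSome && h.isSome then (l, m, h) else pvLoopB xs l m h

def find_target_frequencies_alt (freqs : List Int) : Int × Int × Int :=
  match pvLoopB freqs none none none with
  | (l, m, h) => (l.getD 0, m.getD 0, h.getD 0)

-- ===== PRECONDITION & SPEC =====
-- Pre_ excludes exactly the inputs where Python A raises UnboundLocalError: an element > 1500
-- guarantees all three thresholds are met (it also exceeds 500 and 1000).
def Pre_find_target_frequencies (freqs : List Int) : Prop := ∃ x ∈ freqs, x > 1500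
instance (freqs : List Int) : Decidable (Pre_find_target_frequencies freqs) := by unfold Pre_find_target_frequencies; infer_instance

def pvWitness_find_target_frequencies : List Int := [600, 1600]

def Spec_find_target_frequencies (freqs : List Int) (out : Int × Int × Int) : Prop := out = find_target_frequencies_alt freqs
instance (freqs : List Int) (out : Int × Int × Int) : Decidable (Spec_find_target_frequencies freqs out) := by unfold Spec_find_target_frequencies; infer_instance

-- ===== CLAIM (what is proved, stated in full; the proofs are below) =====
def Claim_equal_find_target_frequencies : Prop := ∀ (freqs : List Int), Dom_find_target_frequencies freqs → Pre_find_target_frequencies freqs → Spec_find_target_frequencies freqs (find_target_frequencies freqs)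

-- ===== LEMMAS AND PROOFS =====

-- invariant: the single pass computes, per component, the already-found value or else the first match
theorem pvLoopB_eq (xs : List Int) : ∀ l m h : Option Int,
    pvLoopB xs l m h =
      ((if l.isSome then l else pvFirstGt 500 xs),
       (if m.isSome then m else pvFirstGt 1000 xs),
       (if h.isSome then h else pvFirstGt 1500 xs)) := by
  induction xs with
  | nil => intro l m h; cases l <;> cases m <;> cases h <;> simp [pvLoopB, pvFirstGt]
  | cons x xs ih =>
    intro l m h
    simp only [pvLoopB]
    by_cases h5 : x > 500 <;> by_cases h10 : x > 1000 <;> by_cases h15 : x > 1500 <;>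
      cases l <;> cases m <;> cases h <;>
      simp [ih, pvFirstGt, h5, h10, h15]

-- ===== VERDICT (by name: the statement is the Claim_ definition above) =====
theorem find_target_frequencies_spec : Claim_equal_find_target_frequencies := by
  intro freqs _ _
  unfold Spec_find_target_frequencies find_target_frequencies find_target_frequencies_alt
  rw [pvLoopB_eq]
  simp
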